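-- pv_equiv track=rewrite | github.com/isomer2023/ENLIT25.SE.G1 | model-forecasting.py | build_tariff_series
-- ===== SOURCE A (Python) =====
-- weekly_hourly_codes = {
--     0: "6;6;6;6;6;6;6;6;2;1;1;1;1;1;2;2;2;2;1;1;1;1;2;2",  # Mon
--     1: "6;6;6;6;6;6;6;6;2;1;1;1;1;1;2;2;2;2;1;1;1;1;2;2",  # Tue
--     2: "6;6;6;6;6;6;6;6;2;1;1;1;1;1;2;2;2;2;1;1;1;1;2;2",  # Wed
--     3: "6;6;6;6;6;6;6;6;2;1;1;1;1;1;2;2;2;2;1;1;1;1;2;2",  # Thu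
--     4: "6;6;6;6;6;6;6;6;2;1;1;1;1;1;2;2;2;2;1;1;1;1;2;2",  # Fri
--     5: "6;6;6;6;6;6;6;6;6;6;6;6;6;6;6;6;6;6;6;6;6;6;6;6",  # Sat
--     6: "6;6;6;6;6;6;6;6;6;6;6;6;6;6;6;6;6;6;6;6;6;6;6;6",  # Sun
-- }
--
-- def build_tariff_series(row):
--     wd = int(row['weekday'])
--     s = weekly_hourly_codes[wd]
--     nums = [int(x) for x in s.split(';') if x.strip()!='']
--     if len(nums) != 24:
--         raise ValueError(f"weekly pattern for weekday {wd} does not have 24 entries")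
--     expanded = []
--     for h in nums:
--         expanded += [h]*4
--     idx = int(row['hour']*4 + row['minute']//15)
--     return expanded[idx]
-- ===== SOURCE B (Python) =====
-- # Arithmetic/branch classification of the time-of-week slot: no tariff table,
-- # no string parsing, no expansion -- the code is computed from weekday and
-- # hour-of-day by range tests (weekend or night -> 6; shoulder hours -> 2; else 1).
--
-- def build_tariff_series(row):
--     wd = int(row['weekday'])
--     h = (int(row['hour'] * 4 + row['minute'] // 15) % 96) // 4
--     if wd >= 5 or h < 8:
--         return 6
--     if h == 8 or 14 <= h < 18 or h >= 22:
--         return 2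
--     return 1
-- ===== Notes on version B (the rewrite author's own statement) =====
-- stated objective: alternative
-- what changed: B drops the tariff table entirely: instead of parsing the semicolon string and indexing a 4x-expanded list, it computes the hour-of-day as (hour*4 + minute//15) % 96 // 4 and classifies it by arithmetic range tests (weekend or night -> 6, shoulder hours -> 2, otherwise 1).
import Mathlib
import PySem

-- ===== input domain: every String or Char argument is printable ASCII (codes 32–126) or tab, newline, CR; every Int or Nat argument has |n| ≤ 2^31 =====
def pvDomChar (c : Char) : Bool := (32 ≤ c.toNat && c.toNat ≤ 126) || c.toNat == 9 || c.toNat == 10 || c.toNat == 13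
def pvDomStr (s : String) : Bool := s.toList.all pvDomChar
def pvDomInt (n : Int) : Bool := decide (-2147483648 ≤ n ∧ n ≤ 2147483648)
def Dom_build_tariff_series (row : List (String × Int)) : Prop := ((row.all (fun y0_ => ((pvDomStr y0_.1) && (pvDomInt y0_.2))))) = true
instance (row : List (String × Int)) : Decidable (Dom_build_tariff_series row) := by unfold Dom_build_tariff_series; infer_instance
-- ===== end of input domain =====

-- B replaces A's string-parsed, 4x-expanded lookup table by arithmetic range tests on
-- weekday and hour-of-day (no table at all) — an alternative classification, not faster.

-- ===== PORT A =====
def weekly_hourly_codes : PySem.Dict Int String := PySem.Dict.mk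
  [ (0, "6;6;6;6;6;6;6;6;2;1;1;1;1;1;2;2;2;2;1;1;1;1;2;2")
  , (1, "6;6;6;6;6;6;6;6;2;1;1;1;1;1;2;2;2;2;1;1;1;1;2;2")
  , (2, "6;6;6;6;6;6;6;6;2;1;1;1;1;1;2;2;2;2;1;1;1;1;2;2")
  , (3, "6;6;6;6;6;6;6;6;2;1;1;1;1;1;2;2;2;2;1;1;1;1;2;2")
  , (4, "6;6;6;6;6;6;6;6;2;1;1;1;1;1;2;2;2;2;1;1;1;1;2;2")
  , (5, "6;6;6;6;6;6;6;6;6;6;6;6;6;6;6;6;6;6;6;6;6;6;6;6")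
  , (6, "6;6;6;6;6;6;6;6;6;6;6;6;6;6;6;6;6;6;6;6;6;6;6;6") ]

-- literal transliteration of A; the `.getD` defaults sit exactly where Python raises
-- (KeyError / ValueError / IndexError) — all excluded by Pre_.
def build_tariff_series (row : List (String × Int)) : Int :=
  let d := PySem.Dict.mk row
  let wd := (d.get? "weekday").getD 0                       -- KeyError → Pre_
  let s := (PySem.Dict.get? weekly_hourly_codes wd).getD "" -- KeyError → Pre_
  let nums := ((PySem.Str.split? s ";").getD []).filter
      (fun x => PySem.Str.strip x ≠ "") |>.map (fun x => (PySem.Int.ofStr? x).getD 0)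
  if nums.length ≠ 24 then 0                                -- raise ValueError → Pre_
  else
    let expanded := nums.foldl (fun acc h => acc ++ [h, h, h, h]) []
    let idx := (d.get? "hour").getD 0 * 4 +
               PySem.Int.floordiv ((d.get? "minute").getD 0) 15
    (PySem.List.pyGet? expanded idx).getD 0                 -- IndexError → Pre_

-- ===== PORT B =====
def build_tariff_series_alt (row : List (String × Int)) : Int :=
  let d := PySem.Dict.mk row
  let wd := (d.get? "weekday").getD 0
  let h := PySem.Int.floordiv
      (PySem.Int.mod ((d.get? "hour").getD 0 * 4 +
        PySem.Int.floordiv ((d.get? "minute").getD 0) 15) 96) 4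
  if wd ≥ 5 ∨ h < 8 then 6
  else if h = 8 ∨ (14 ≤ h ∧ h < 18) ∨ h ≥ 22 then 2
  else 1

-- ===== PRECONDITION & SPEC =====
-- Pre_: the three keys are present, the weekday is 0..6 (else KeyError) and the
-- quarter-hour index lies in the expanded list's Python index range (else IndexError).
def Pre_build_tariff_series (row : List (String × Int)) : Prop :=
  (PySem.Dict.mk row).contains "weekday" = true ∧
  (PySem.Dict.mk row).contains "hour" = true ∧
  (PySem.Dict.mk row).contains "minute" = true ∧
  0 ≤ (PySem.Dict.mk row).getD "weekday" 0 ∧ (PySem.Dict.mk row).getD "weekday" 0 ≤ 6 ∧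
  -96 ≤ (PySem.Dict.mk row).getD "hour" 0 * 4 +
        PySem.Int.floordiv ((PySem.Dict.mk row).getD "minute" 0) 15 ∧
  (PySem.Dict.mk row).getD "hour" 0 * 4 +
        PySem.Int.floordiv ((PySem.Dict.mk row).getD "minute" 0) 15 < 96

instance (row : List (String × Int)) : Decidable (Pre_build_tariff_series row) := by
  unfold Pre_build_tariff_series; infer_instance

def pvWitness_build_tariff_series : (List (String × Int)) :=
  [("weekday", 0), ("hour", 9), ("minute", 30)]

def Spec_build_tariff_series (row : List (String × Int)) (out : Int) : Prop := out = build_tariff_series_alt row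
instance (row : List (String × Int)) (out : Int) : Decidable (Spec_build_tariff_series row out) := by unfold Spec_build_tariff_series; infer_instance

-- ===== CLAIM =====
def Claim_equal_build_tariff_series : Prop := ∀ (row : List (String × Int)), Dom_build_tariff_series row → Pre_build_tariff_series row → Spec_build_tariff_series row (build_tariff_series row)

-- ===== LEMMAS AND PROOFS =====

-- Python indexing of a 96-element list at idx ∈ [-96, 96) equals plain indexing at
-- idx mod 96; composed with any per-hour classifier f of the position / 4.
lemma pyGet_branch (E : List Int) (hE : E.length = 96) (f : Int → Int)
    (h : ∀ m : Fin 96, E.getD m 0 = f (((m : Nat) / 4 : Nat) : Int))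
    (idx : Int) (h1 : -96 ≤ idx) (h2 : idx < 96) :
    (PySem.List.pyGet? E idx).getD 0 =
      f (PySem.Int.floordiv (PySem.Int.mod idx 96) 4) := by
  show PySem.List.pyGetD E idx 0 = _
  rw [PySem.Int.mod_eq_emod_of_pos (by norm_num),
      PySem.Int.floordiv_eq_ediv_of_pos (by norm_num)]
  have hm0 : 0 ≤ idx % 96 := Int.emod_nonneg idx (by norm_num)
  have hm1 : idx % 96 < 96 := Int.emod_lt_of_pos idx (by norm_num)
  set m : Nat := (idx % 96).toNat with hmdef
  have hmlt : m < 96 := by omega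
  have hq : idx % 96 / 4 = ((m / 4 : Nat) : Int) := by omega
  rw [hq]
  have hEm : E.getD m 0 = f ((m / 4 : Nat) : Int) := h ⟨m, hmlt⟩
  rw [← hEm]
  rcases (by omega : 0 ≤ idx ∨ idx < 0) with hpos | hneg
  · rw [PySem.List.pyGetD_eq_getElem E 0 hpos (by omega : idx < (E.length : Int))]
    rw [List.getD_eq_getElem _ _ (by omega)]
    congr 1
    omega
  · obtain ⟨k, rfl⟩ : ∃ k : Nat, idx = -(k : Int) := ⟨(-idx).toNat, by omega⟩
    rw [PySem.List.pyGetD_neg_natCast E k 0 (by omega) (by omega)]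
    rw [List.getD_eq_getElem _ _ (by omega)]
    congr 1
    omega

-- ===== VERDICT =====
set_option maxRecDepth 16384 in
theorem build_tariff_series_spec : Claim_equal_build_tariff_series := by
  intro row _ hpre
  unfold Pre_build_tariff_series at hpre
  obtain ⟨-, -, -, h0, h6, hlo, hhi⟩ := hpre
  unfold Spec_build_tariff_series build_tariff_series build_tariff_series_alt
  dsimp only
  have hg : ∀ k : String, ((PySem.Dict.mk row).get? k).getD 0 =
      (PySem.Dict.mk row).getD k 0 := fun _ => rfl
  rw [hg "weekday"]
  have h7 : (PySem.Dict.mk row).getD "weekday" 0 = 0 ∨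
      (PySem.Dict.mk row).getD "weekday" 0 = 1 ∨ (PySem.Dict.mk row).getD "weekday" 0 = 2 ∨
      (PySem.Dict.mk row).getD "weekday" 0 = 3 ∨ (PySem.Dict.mk row).getD "weekday" 0 = 4 ∨
      (PySem.Dict.mk row).getD "weekday" 0 = 5 ∨ (PySem.Dict.mk row).getD "weekday" 0 = 6 := by
    omega
  rcases h7 with hw | hw | hw | hw | hw | hw | hw <;>
    rw [hw] <;> rw [if_neg (by decide)]
  · exact pyGet_branch _ (by decide)
      (fun h' => if (0:Int) ≥ 5 ∨ h' < 8 then 6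
        else if h' = 8 ∨ (14 ≤ h' ∧ h' < 18) ∨ h' ≥ 22 then 2 else 1)
      (by decide) _
      (by rw [hg "hour", hg "minute"]; omega) (by rw [hg "hour", hg "minute"]; omega)
  · exact pyGet_branch _ (by decide)
      (fun h' => if (1:Int) ≥ 5 ∨ h' < 8 then 6
        else if h' = 8 ∨ (14 ≤ h' ∧ h' < 18) ∨ h' ≥ 22 then 2 else 1)
      (by decide) _
      (by rw [hg "hour", hg "minute"]; omega) (by rw [hg "hour", hg "minute"]; omega)
  · exact pyGet_branch _ (by decide)
      (fun h' => if (2:Int) ≥ 5 ∨ h' < 8 then 6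
        else if h' = 8 ∨ (14 ≤ h' ∧ h' < 18) ∨ h' ≥ 22 then 2 else 1)
      (by decide) _
      (by rw [hg "hour", hg "minute"]; omega) (by rw [hg "hour", hg "minute"]; omega)
  · exact pyGet_branch _ (by decide)
      (fun h' => if (3:Int) ≥ 5 ∨ h' < 8 then 6
        else if h' = 8 ∨ (14 ≤ h' ∧ h' < 18) ∨ h' ≥ 22 then 2 else 1)
      (by decide) _
      (by rw [hg "hour", hg "minute"]; omega) (by rw [hg "hour", hg "minute"]; omega)
  · exact pyGet_branch _ (by decide)
      (fun h' => if (4:Int) ≥ 5 ∨ h' < 8 then 6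
        else if h' = 8 ∨ (14 ≤ h' ∧ h' < 18) ∨ h' ≥ 22 then 2 else 1)
      (by decide) _
      (by rw [hg "hour", hg "minute"]; omega) (by rw [hg "hour", hg "minute"]; omega)
  · exact pyGet_branch _ (by decide)
      (fun h' => if (5:Int) ≥ 5 ∨ h' < 8 then 6
        else if h' = 8 ∨ (14 ≤ h' ∧ h' < 18) ∨ h' ≥ 22 then 2 else 1)
      (by decide) _
      (by rw [hg "hour", hg "minute"]; omega) (by rw [hg "hour", hg "minute"]; omega)
  · exact pyGet_branch _ (by decide)
      (fun h' => if (6:Int) ≥ 5 ∨ h' < 8 then 6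
        else if h' = 8 ∨ (14 ≤ h' ∧ h' < 18) ∨ h' ≥ 22 then 2 else 1)
      (by decide) _
      (by rw [hg "hour", hg "minute"]; omega) (by rw [hg "hour", hg "minute"]; omega)
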